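-- pv_equiv track=rewrite | github.com/prab786/WRGNN | utils/stronger_validation_code.py | _modify_attribution_words
-- ===== SOURCE A (Python) =====
-- def _modify_attribution_words(text: str) -> str:
--     """Modify attribution words to be less credible."""
--     # Replace credible sources with vague ones
--     replacements = {
--         'officials': 'sources',
--         'confirmed': 'alleged',
--         'reported': 'claimed',
--         'according to': 'rumors suggest',
--         'study shows': 'some say'
--     }
--
--     modified_text = text
--     for original, replacement in replacements.items():
--         modified_text = modified_text.replace(original, replacement)
--
--     return modified_text
-- ===== SOURCE B (Python) =====
-- _TABLE = (('officials', 'sources'), ('confirmed', 'alleged'),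
--           ('reported', 'claimed'), ('according to', 'rumors suggest'),
--           ('study shows', 'some say'))
--
--
-- def _modify_attribution_words(text: str) -> str:
--     """Modify attribution words to be less credible (single left-to-right pass)."""
--     out = []
--     i = 0
--     n = len(text)
--     while i < n:
--         for original, replacement in _TABLE:
--             if text.startswith(original, i):
--                 out.append(replacement)
--                 i += len(original)
--                 break
--         else:
--             out.append(text[i])
--             i += 1
--     return ''.join(out)
-- ===== Notes on version B (the rewrite author's own statement) =====
-- stated objective: alternative
-- what changed: Replaces the five sequential full-string str.replace passes with a single left-to-right scan that at each position tries the five keys in dict order, emits the substitute and jumps past the match (or copies one character), building the output once.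
-- outside the precondition, e.g. on _modify_attribution_words('officialstudy shows'): A returns 'sourcesome say', B returns 'sourcestudy shows'; on _modify_attribution_words('according tofficials'): A returns 'according tsources', B returns 'rumors suggestfficials'; on _modify_attribution_words('study showofficials'): A returns 'some sayources', B returns 'study showsources'
import Mathlib
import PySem

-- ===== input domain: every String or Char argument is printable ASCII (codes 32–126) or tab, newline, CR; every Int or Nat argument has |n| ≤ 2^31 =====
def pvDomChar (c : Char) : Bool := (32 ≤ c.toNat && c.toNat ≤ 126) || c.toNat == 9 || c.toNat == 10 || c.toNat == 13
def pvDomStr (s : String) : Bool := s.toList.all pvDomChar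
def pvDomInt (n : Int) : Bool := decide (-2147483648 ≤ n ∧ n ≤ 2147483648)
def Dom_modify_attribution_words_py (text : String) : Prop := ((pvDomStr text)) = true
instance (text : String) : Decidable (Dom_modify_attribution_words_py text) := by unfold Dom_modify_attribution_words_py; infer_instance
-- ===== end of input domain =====

-- B replaces A's five sequential full-string str.replace passes by ONE left-to-right scan that tries the
-- five keys in dict order at each position; proved equal on texts without overlapping/cascading key
-- occurrences (the Pre_ below); objective: alternative (not claimed faster).

-- ===== PORT A =====
def modify_attribution_words_py (text : String) : String :=
  -- replacements dict (insertion order) as an association list; the for-loop is a fold of str.replace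
  let replacements : List (String × String) :=
    [("officials", "sources"), ("confirmed", "alleged"), ("reported", "claimed"),
     ("according to", "rumors suggest"), ("study shows", "some say")]
  replacements.foldl (fun modified_text kv => PySem.Str.replace modified_text kv.1 kv.2) text

-- ===== PORT B =====
-- B's keys and substitutes (same dict, as code-point lists)
def bK1 : List Char := ['o', 'f', 'f', 'i', 'c', 'i', 'a', 'l', 's']            -- "officials"
def bK2 : List Char := ['c', 'o', 'n', 'f', 'i', 'r', 'm', 'e', 'd']            -- "confirmed"
def bK3 : List Char := ['r', 'e', 'p', 'o', 'r', 't', 'e', 'd']                 -- "reported"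
def bK4 : List Char := ['a', 'c', 'c', 'o', 'r', 'd', 'i', 'n', 'g', ' ', 't', 'o']  -- "according to"
def bK5 : List Char := ['s', 't', 'u', 'd', 'y', ' ', 's', 'h', 'o', 'w', 's']  -- "study shows"
def bR1 : List Char := ['s', 'o', 'u', 'r', 'c', 'e', 's']                      -- "sources"
def bR2 : List Char := ['a', 'l', 'l', 'e', 'g', 'e', 'd']                      -- "alleged"
def bR3 : List Char := ['c', 'l', 'a', 'i', 'm', 'e', 'd']                      -- "claimed"
def bR4 : List Char := ['r', 'u', 'm', 'o', 'r', 's', ' ', 's', 'u', 'g', 'g', 'e', 's', 't']  -- "rumors suggest"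
def bR5 : List Char := ['s', 'o', 'm', 'e', ' ', 's', 'a', 'y']                 -- "some say"

-- Source B's single while-loop: at each position try the keys in dict order (text.startswith(k, i));
-- on a match append the substitute and jump past the key, otherwise copy one character.
def scanChars : List Char → List Char
  | [] => []
  | c :: t =>
    if h1 : bK1 <+: (c :: t) then bR1 ++ scanChars ((c :: t).drop bK1.length)
    else if h2 : bK2 <+: (c :: t) then bR2 ++ scanChars ((c :: t).drop bK2.length)
    else if h3 : bK3 <+: (c :: t) then bR3 ++ scanChars ((c :: t).drop bK3.length)
    else if h4 : bK4 <+: (c :: t) then bR4 ++ scanChars ((c :: t).drop bK4.length)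
    else if h5 : bK5 <+: (c :: t) then bR5 ++ scanChars ((c :: t).drop bK5.length)
    else c :: scanChars t
  termination_by s => s.length
  decreasing_by
  · have hle := h1.length_le
    have hk : bK1.length = 9 := rfl
    simp only [List.length_drop, hk, List.length_cons] at hle ⊢; omega
  · have hle := h2.length_le
    have hk : bK2.length = 9 := rfl
    simp only [List.length_drop, hk, List.length_cons] at hle ⊢; omega
  · have hle := h3.length_le
    have hk : bK3.length = 8 := rfl
    simp only [List.length_drop, hk, List.length_cons] at hle ⊢; omega
  · have hle := h4.length_le
    have hk : bK4.length = 12 := rfl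
    simp only [List.length_drop, hk, List.length_cons] at hle ⊢; omega
  · have hle := h5.length_le
    have hk : bK5.length = 11 := rfl
    simp only [List.length_drop, hk, List.length_cons] at hle ⊢; omega
  · simp

def modify_attribution_words_py_alt (text : String) : String :=
  String.ofList (scanChars text.toList)

-- ===== PRECONDITION & SPEC =====
-- Pre_ excludes texts containing one of five literal substrings on which occurrences of two
-- replacement keys overlap or a substitution butts against following text to form a new key
-- occurrence: there the value depends on the accidental dict order / number of passes, and A's
-- sequential-pass result and B's single-pass result are both defensible.
def Pre_modify_attribution_words_py (text : String) : Prop :=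
  PySem.Str.isIn "officialstudy shows" text = false ∧
  PySem.Str.isIn "according tofficials" text = false ∧
  PySem.Str.isIn "according toudy shows" text = false ∧
  PySem.Str.isIn "according toudy showofficials" text = false ∧
  PySem.Str.isIn "study showofficials" text = false
instance (text : String) : Decidable (Pre_modify_attribution_words_py text) := by
  unfold Pre_modify_attribution_words_py; infer_instance

def pvWitness_modify_attribution_words_py : String := "officials confirmed the study shows it, according to reports"

def Spec_modify_attribution_words_py (text : String) (out : String) : Prop :=
  out = modify_attribution_words_py_alt text
instance (text : String) (out : String) : Decidable (Spec_modify_attribution_words_py text out) := by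
  unfold Spec_modify_attribution_words_py; infer_instance

-- ===== CLAIM (what is proved, stated in full; the proofs are below) =====
def Claim_equal_modify_attribution_words_py : Prop := ∀ (text : String), Dom_modify_attribution_words_py text → Pre_modify_attribution_words_py text → Spec_modify_attribution_words_py text (modify_attribution_words_py text)

-- ===== LEMMAS AND PROOFS =====

-- A simple structural model of CPython str.replace (all occurrences, left to right, no rescan)
def rep (old new : List Char) : List Char → List Char
  | [] => []
  | c :: t =>
    if h : old ≠ [] ∧ old <+: (c :: t) then new ++ rep old new ((c :: t).drop old.length)
    else c :: rep old new t
  termination_by s => s.length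
  decreasing_by
  · have := h.2.length_le
    have ho : 1 ≤ old.length := by
      cases old with
      | nil => exact absurd rfl h.1
      | cons _ _ => simp
    simp only [List.length_drop]; simp at this ⊢; omega
  · simp

lemma rep_nil (old new : List Char) : rep old new [] = [] := by simp [rep]

lemma rep_match (old new : List Char) (s : List Char) (h0 : old ≠ []) (h : old <+: s) :
    rep old new s = new ++ rep old new (s.drop old.length) := by
  cases s with
  | nil => exact absurd (List.prefix_nil.mp h) h0
  | cons c t => rw [rep, dif_pos ⟨h0, h⟩]

lemma rep_step (old new : List Char) (c : Char) (t : List Char) (h : ¬ old <+: (c :: t)) :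
    rep old new (c :: t) = c :: rep old new t := by
  rw [rep, dif_neg (by tauto)]

lemma go_eq (old new : List Char) (h0 : old ≠ []) :
    ∀ (fuel : Nat) (l acc : List Char), l.length ≤ fuel →
      PySem.Chars.replace.go old new fuel l acc = acc.reverse ++ rep old new l := by
  have hol : 1 ≤ old.length := by
    cases old with
    | nil => exact absurd rfl h0
    | cons _ _ => simp
  intro fuel
  induction fuel with
  | zero =>
    intro l acc h
    have : l = [] := by cases l with | nil => rfl | cons a b => simp at h
    subst this
    rw [PySem.Chars.replace.go.eq_def]; simp [rep_nil]
  | succ n ih =>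
    intro l acc h
    cases l with
    | nil => rw [PySem.Chars.replace.go.eq_def]; simp [rep_nil]
    | cons c t =>
      rw [PySem.Chars.replace.go.eq_def]
      simp only []
      by_cases hp : old.isPrefixOf (c :: t)
      · rw [if_pos hp]
        have hp' : old <+: (c :: t) := List.isPrefixOf_iff_prefix.mp hp
        have hlen : ((c :: t).drop old.length).length ≤ n := by
          simp only [List.length_drop]; simp at h ⊢; omega
        rw [ih _ _ hlen, rep_match old new _ h0 hp']
        simp
      · rw [if_neg hp]
        have hp' : ¬ old <+: (c :: t) := fun hc => hp (List.isPrefixOf_iff_prefix.mpr hc)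
        have hlen : t.length ≤ n := by simp at h; omega
        rw [ih _ _ hlen, rep_step old new _ _ hp']
        simp

lemma replace_eq_rep (s old new : List Char) (h0 : old ≠ []) :
    PySem.Chars.replace s old new = rep old new s := by
  rw [PySem.Chars.replace.eq_def, if_neg (by simp [List.isEmpty_iff, h0]),
      go_eq old new h0 s.length s [] le_rfl]
  simp

lemma prefix_append_cases {x w v : List Char} (h : x <+: w ++ v) : x <+: w ∨ w <+: x := by
  induction w generalizing x with
  | nil => exact Or.inr (List.nil_prefix)
  | cons c w' ih =>
    cases x with
    | nil => exact Or.inl (List.nil_prefix)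
    | cons a x' =>
      rw [List.cons_append, List.cons_prefix_cons] at h
      obtain ⟨rfl, h'⟩ := h
      rcases ih h' with h | h
      · exact Or.inl (List.cons_prefix_cons.mpr ⟨rfl, h⟩)
      · exact Or.inr (List.cons_prefix_cons.mpr ⟨rfl, h⟩)

lemma not_prefix_append_of_incompat (old w v : List Char) (h1 : ¬ old <+: w) (h2 : ¬ w <+: old) :
    ¬ old <+: w ++ v := fun hp => (prefix_append_cases hp).elim h1 h2

lemma rep_append (old new u v : List Char) (h : ∀ i, i < u.length → ¬ old <+: (u.drop i ++ v)) :
    rep old new (u ++ v) = u ++ rep old new v := by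
  induction u with
  | nil => simp
  | cons c u' ih =>
    rw [List.cons_append, rep_step old new c (u' ++ v) (by simpa using h 0 (by simp))]
    rw [ih (fun i hi => by simpa using h (i + 1) (by simpa using hi))]
    rfl

lemma rep_append_incompat (old new u v : List Char)
    (h : ∀ i, i < u.length → ¬ old <+: u.drop i ∧ ¬ u.drop i <+: old) :
    rep old new (u ++ v) = u ++ rep old new v :=
  rep_append old new u v (fun i hi =>
    not_prefix_append_of_incompat _ _ _ (h i hi).1 (h i hi).2)

-- transfer: a prefix X of the output of one replace pass was already a prefix of its input,
-- provided no suffix of X is prefix-compatible with the inserted text `new`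
lemma rep_transfer (old new X : List Char)
    (h : ∀ i, i < X.length → ¬ X.drop i <+: new ∧ ¬ new <+: X.drop i) :
    ∀ t, X <+: rep old new t → X <+: t := by
  intro t
  induction t generalizing X with
  | nil => rw [rep_nil]; exact fun h => h
  | cons c t' ih =>
    intro hx
    by_cases hm : old ≠ [] ∧ old <+: (c :: t')
    · rw [rep_match old new _ hm.1 hm.2] at hx
      cases X with
      | nil => exact List.nil_prefix
      | cons a X' =>
        rcases prefix_append_cases hx with h1 | h1
        · exact absurd h1 (h 0 (by simp)).1
        · exact absurd h1 (h 0 (by simp)).2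
    · rw [rep, dif_neg hm] at hx
      cases X with
      | nil => exact List.nil_prefix
      | cons a X' =>
        rw [List.cons_prefix_cons] at hx
        obtain ⟨rfl, hx'⟩ := hx
        exact List.cons_prefix_cons.mpr
          ⟨rfl, ih X' (fun i hi => by simpa using h (i + 1) (by simpa using hi)) hx'⟩


lemma scan_nil : scanChars [] = [] := by simp [scanChars]

lemma scan1 (c : Char) (t : List Char) (h1 : bK1 <+: (c :: t)) :
    scanChars (c :: t) = bR1 ++ scanChars ((c :: t).drop bK1.length) := by
  simp only [scanChars]; rw [dif_pos h1]

lemma scan2 (c : Char) (t : List Char) (h1 : ¬ bK1 <+: (c :: t)) (h2 : bK2 <+: (c :: t)) :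
    scanChars (c :: t) = bR2 ++ scanChars ((c :: t).drop bK2.length) := by
  simp only [scanChars]; rw [dif_neg h1, dif_pos h2]

lemma scan3 (c : Char) (t : List Char) (h1 : ¬ bK1 <+: (c :: t)) (h2 : ¬ bK2 <+: (c :: t))
    (h3 : bK3 <+: (c :: t)) :
    scanChars (c :: t) = bR3 ++ scanChars ((c :: t).drop bK3.length) := by
  simp only [scanChars]; rw [dif_neg h1, dif_neg h2, dif_pos h3]

lemma scan4 (c : Char) (t : List Char) (h1 : ¬ bK1 <+: (c :: t)) (h2 : ¬ bK2 <+: (c :: t))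
    (h3 : ¬ bK3 <+: (c :: t)) (h4 : bK4 <+: (c :: t)) :
    scanChars (c :: t) = bR4 ++ scanChars ((c :: t).drop bK4.length) := by
  simp only [scanChars]; rw [dif_neg h1, dif_neg h2, dif_neg h3, dif_pos h4]

lemma scan5 (c : Char) (t : List Char) (h1 : ¬ bK1 <+: (c :: t)) (h2 : ¬ bK2 <+: (c :: t))
    (h3 : ¬ bK3 <+: (c :: t)) (h4 : ¬ bK4 <+: (c :: t)) (h5 : bK5 <+: (c :: t)) :
    scanChars (c :: t) = bR5 ++ scanChars ((c :: t).drop bK5.length) := by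
  simp only [scanChars]; rw [dif_neg h1, dif_neg h2, dif_neg h3, dif_neg h4, dif_pos h5]

lemma scan_step (c : Char) (t : List Char) (h1 : ¬ bK1 <+: (c :: t)) (h2 : ¬ bK2 <+: (c :: t))
    (h3 : ¬ bK3 <+: (c :: t)) (h4 : ¬ bK4 <+: (c :: t)) (h5 : ¬ bK5 <+: (c :: t)) :
    scanChars (c :: t) = c :: scanChars t := by
  simp only [scanChars]; rw [dif_neg h1, dif_neg h2, dif_neg h3, dif_neg h4, dif_neg h5]

lemma LS9 (t : List Char) (h : ['s'] <+: rep bK1 bR1 t) : ['s'] <+: t ∨ bK1 <+: t := by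
  cases t with
  | nil => rw [rep_nil] at h; simp at h
  | cons c t' =>
    by_cases hm : bK1 <+: (c :: t')
    · exact Or.inr hm
    · rw [rep_step _ _ _ _ hm, List.cons_prefix_cons] at h
      exact Or.inl (List.cons_prefix_cons.mpr ⟨h.1, List.nil_prefix⟩)

lemma LS8 (t : List Char) (h : ['w', 's'] <+: rep bK1 bR1 t) :
    ['w', 's'] <+: t ∨ (['w'] ++ bK1) <+: t := by
  cases t with
  | nil => rw [rep_nil] at h; simp at h
  | cons c t' =>
    by_cases hm : bK1 <+: (c :: t')
    · rw [rep_match _ _ _ (by decide) hm] at h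
      exact absurd h (not_prefix_append_of_incompat _ _ _ (by decide) (by decide))
    · rw [rep_step _ _ _ _ hm, List.cons_prefix_cons] at h
      rcases LS9 t' h.2 with hl | hr
      · exact Or.inl (List.cons_prefix_cons.mpr ⟨h.1, hl⟩)
      · exact Or.inr (List.cons_prefix_cons.mpr ⟨h.1, hr⟩)

lemma LS7 (t : List Char) (h : ['o', 'w', 's'] <+: rep bK1 bR1 t) :
    ['o', 'w', 's'] <+: t ∨ (['o', 'w'] ++ bK1) <+: t := by
  cases t with
  | nil => rw [rep_nil] at h; simp at h
  | cons c t' =>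
    by_cases hm : bK1 <+: (c :: t')
    · rw [rep_match _ _ _ (by decide) hm] at h
      exact absurd h (not_prefix_append_of_incompat _ _ _ (by decide) (by decide))
    · rw [rep_step _ _ _ _ hm, List.cons_prefix_cons] at h
      rcases LS8 t' h.2 with hl | hr
      · exact Or.inl (List.cons_prefix_cons.mpr ⟨h.1, hl⟩)
      · exact Or.inr (List.cons_prefix_cons.mpr ⟨h.1, hr⟩)

lemma LS6 (t : List Char) (h : ['h', 'o', 'w', 's'] <+: rep bK1 bR1 t) :
    ['h', 'o', 'w', 's'] <+: t ∨ (['h', 'o', 'w'] ++ bK1) <+: t := by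
  cases t with
  | nil => rw [rep_nil] at h; simp at h
  | cons c t' =>
    by_cases hm : bK1 <+: (c :: t')
    · rw [rep_match _ _ _ (by decide) hm] at h
      exact absurd h (not_prefix_append_of_incompat _ _ _ (by decide) (by decide))
    · rw [rep_step _ _ _ _ hm, List.cons_prefix_cons] at h
      rcases LS7 t' h.2 with hl | hr
      · exact Or.inl (List.cons_prefix_cons.mpr ⟨h.1, hl⟩)
      · exact Or.inr (List.cons_prefix_cons.mpr ⟨h.1, hr⟩)

lemma LS5 (t : List Char) (h : ['s', 'h', 'o', 'w', 's'] <+: rep bK1 bR1 t) :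
    ['s', 'h', 'o', 'w', 's'] <+: t ∨ (['s', 'h', 'o', 'w'] ++ bK1) <+: t := by
  cases t with
  | nil => rw [rep_nil] at h; simp at h
  | cons c t' =>
    by_cases hm : bK1 <+: (c :: t')
    · rw [rep_match _ _ _ (by decide) hm] at h
      exact absurd h (not_prefix_append_of_incompat _ _ _ (by decide) (by decide))
    · rw [rep_step _ _ _ _ hm, List.cons_prefix_cons] at h
      rcases LS6 t' h.2 with hl | hr
      · exact Or.inl (List.cons_prefix_cons.mpr ⟨h.1, hl⟩)
      · exact Or.inr (List.cons_prefix_cons.mpr ⟨h.1, hr⟩)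

lemma LS4 (t : List Char) (h : [' ', 's', 'h', 'o', 'w', 's'] <+: rep bK1 bR1 t) :
    [' ', 's', 'h', 'o', 'w', 's'] <+: t ∨ ([' ', 's', 'h', 'o', 'w'] ++ bK1) <+: t := by
  cases t with
  | nil => rw [rep_nil] at h; simp at h
  | cons c t' =>
    by_cases hm : bK1 <+: (c :: t')
    · rw [rep_match _ _ _ (by decide) hm] at h
      exact absurd h (not_prefix_append_of_incompat _ _ _ (by decide) (by decide))
    · rw [rep_step _ _ _ _ hm, List.cons_prefix_cons] at h
      rcases LS5 t' h.2 with hl | hr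
      · exact Or.inl (List.cons_prefix_cons.mpr ⟨h.1, hl⟩)
      · exact Or.inr (List.cons_prefix_cons.mpr ⟨h.1, hr⟩)

lemma LS3 (t : List Char) (h : ['y', ' ', 's', 'h', 'o', 'w', 's'] <+: rep bK1 bR1 t) :
    ['y', ' ', 's', 'h', 'o', 'w', 's'] <+: t ∨ (['y', ' ', 's', 'h', 'o', 'w'] ++ bK1) <+: t := by
  cases t with
  | nil => rw [rep_nil] at h; simp at h
  | cons c t' =>
    by_cases hm : bK1 <+: (c :: t')
    · rw [rep_match _ _ _ (by decide) hm] at h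
      exact absurd h (not_prefix_append_of_incompat _ _ _ (by decide) (by decide))
    · rw [rep_step _ _ _ _ hm, List.cons_prefix_cons] at h
      rcases LS4 t' h.2 with hl | hr
      · exact Or.inl (List.cons_prefix_cons.mpr ⟨h.1, hl⟩)
      · exact Or.inr (List.cons_prefix_cons.mpr ⟨h.1, hr⟩)

lemma LS2 (t : List Char) (h : ['d', 'y', ' ', 's', 'h', 'o', 'w', 's'] <+: rep bK1 bR1 t) :
    ['d', 'y', ' ', 's', 'h', 'o', 'w', 's'] <+: t ∨ (['d', 'y', ' ', 's', 'h', 'o', 'w'] ++ bK1) <+: t := by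
  cases t with
  | nil => rw [rep_nil] at h; simp at h
  | cons c t' =>
    by_cases hm : bK1 <+: (c :: t')
    · rw [rep_match _ _ _ (by decide) hm] at h
      exact absurd h (not_prefix_append_of_incompat _ _ _ (by decide) (by decide))
    · rw [rep_step _ _ _ _ hm, List.cons_prefix_cons] at h
      rcases LS3 t' h.2 with hl | hr
      · exact Or.inl (List.cons_prefix_cons.mpr ⟨h.1, hl⟩)
      · exact Or.inr (List.cons_prefix_cons.mpr ⟨h.1, hr⟩)

lemma LS1 (t : List Char) (h : ['u', 'd', 'y', ' ', 's', 'h', 'o', 'w', 's'] <+: rep bK1 bR1 t) :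
    ['u', 'd', 'y', ' ', 's', 'h', 'o', 'w', 's'] <+: t ∨ (['u', 'd', 'y', ' ', 's', 'h', 'o', 'w'] ++ bK1) <+: t := by
  cases t with
  | nil => rw [rep_nil] at h; simp at h
  | cons c t' =>
    by_cases hm : bK1 <+: (c :: t')
    · rw [rep_match _ _ _ (by decide) hm] at h
      exact absurd h (not_prefix_append_of_incompat _ _ _ (by decide) (by decide))
    · rw [rep_step _ _ _ _ hm, List.cons_prefix_cons] at h
      rcases LS2 t' h.2 with hl | hr
      · exact Or.inl (List.cons_prefix_cons.mpr ⟨h.1, hl⟩)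
      · exact Or.inr (List.cons_prefix_cons.mpr ⟨h.1, hr⟩)

lemma LS0 (t : List Char) (h : ['t', 'u', 'd', 'y', ' ', 's', 'h', 'o', 'w', 's'] <+: rep bK1 bR1 t) :
    ['t', 'u', 'd', 'y', ' ', 's', 'h', 'o', 'w', 's'] <+: t ∨ (['t', 'u', 'd', 'y', ' ', 's', 'h', 'o', 'w'] ++ bK1) <+: t := by
  cases t with
  | nil => rw [rep_nil] at h; simp at h
  | cons c t' =>
    by_cases hm : bK1 <+: (c :: t')
    · rw [rep_match _ _ _ (by decide) hm] at h
      exact absurd h (not_prefix_append_of_incompat _ _ _ (by decide) (by decide))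
    · rw [rep_step _ _ _ _ hm, List.cons_prefix_cons] at h
      rcases LS1 t' h.2 with hl | hr
      · exact Or.inl (List.cons_prefix_cons.mpr ⟨h.1, hl⟩)
      · exact Or.inr (List.cons_prefix_cons.mpr ⟨h.1, hr⟩)

lemma noTudy (t : List Char) (h1 : ¬ ['t', 'u', 'd', 'y', ' ', 's', 'h', 'o', 'w', 's'] <+: t) (h2 : ¬ (['t', 'u', 'd', 'y', ' ', 's', 'h', 'o', 'w'] ++ bK1) <+: t) :
    ¬ ['t', 'u', 'd', 'y', ' ', 's', 'h', 'o', 'w', 's'] <+: rep bK4 bR4 (rep bK3 bR3 (rep bK2 bR2 (rep bK1 bR1 t))) := by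
  intro hx
  have hx3 := rep_transfer bK4 bR4 _ (by decide) _ hx
  have hx2 := rep_transfer bK3 bR3 _ (by decide) _ hx3
  have hx1 := rep_transfer bK2 bR2 _ (by decide) _ hx2
  rcases LS0 t hx1 with h | h
  · exact h1 h
  · exact h2 h

lemma noUdy (t : List Char) (h1 : ¬ ['u', 'd', 'y', ' ', 's', 'h', 'o', 'w', 's'] <+: t) (h2 : ¬ (['u', 'd', 'y', ' ', 's', 'h', 'o', 'w'] ++ bK1) <+: t) :
    ¬ ['u', 'd', 'y', ' ', 's', 'h', 'o', 'w', 's'] <+: rep bK4 bR4 (rep bK3 bR3 (rep bK2 bR2 (rep bK1 bR1 t))) := by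
  intro hx
  have hx3 := rep_transfer bK4 bR4 _ (by decide) _ hx
  have hx2 := rep_transfer bK3 bR3 _ (by decide) _ hx3
  have hx1 := rep_transfer bK2 bR2 _ (by decide) _ hx2
  rcases LS1 t hx1 with h | h
  · exact h1 h
  · exact h2 h


-- the composition of A's five passes, at the code-point level
def compR (t : List Char) : List Char :=
  rep bK5 bR5 (rep bK4 bR4 (rep bK3 bR3 (rep bK2 bR2 (rep bK1 bR1 t))))

-- Pre_ at the code-point level
def bb1 : List Char := ['o', 'f', 'f', 'i', 'c', 'i', 'a', 'l', 's', 't', 'u', 'd', 'y', ' ', 's', 'h', 'o', 'w', 's']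
def bb2 : List Char := ['a', 'c', 'c', 'o', 'r', 'd', 'i', 'n', 'g', ' ', 't', 'o', 'f', 'f', 'i', 'c', 'i', 'a', 'l', 's']
def bb3 : List Char := ['a', 'c', 'c', 'o', 'r', 'd', 'i', 'n', 'g', ' ', 't', 'o', 'u', 'd', 'y', ' ', 's', 'h', 'o', 'w', 's']
def bb5 : List Char := ['a', 'c', 'c', 'o', 'r', 'd', 'i', 'n', 'g', ' ', 't', 'o', 'u', 'd', 'y', ' ', 's', 'h', 'o', 'w', 'o', 'f', 'f', 'i', 'c', 'i', 'a', 'l', 's']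
def bb6 : List Char := ['s', 't', 'u', 'd', 'y', ' ', 's', 'h', 'o', 'w', 'o', 'f', 'f', 'i', 'c', 'i', 'a', 'l', 's']

def PreL (t : List Char) : Prop :=
  ¬ bb1 <:+: t ∧ ¬ bb2 <:+: t ∧ ¬ bb3 <:+: t ∧ ¬ bb5 <:+: t ∧ ¬ bb6 <:+: t

lemma PreL_suffix {s t : List Char} (hsuf : t <:+ s) (h : PreL s) : PreL t := by
  obtain ⟨a1, a2, a3, a5, a6⟩ := h
  exact ⟨fun hc => a1 (hc.trans hsuf.isInfix), fun hc => a2 (hc.trans hsuf.isInfix),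
         fun hc => a3 (hc.trans hsuf.isInfix), fun hc => a5 (hc.trans hsuf.isInfix),
         fun hc => a6 (hc.trans hsuf.isInfix)⟩


lemma comp_match1 (u : List Char)
    (hb1 : ¬ ['t', 'u', 'd', 'y', ' ', 's', 'h', 'o', 'w', 's'] <+: u)
    (hb6 : ¬ (['t', 'u', 'd', 'y', ' ', 's', 'h', 'o', 'w'] ++ bK1) <+: u) :
    compR (bK1 ++ u) = bR1 ++ compR u := by
  unfold compR
  rw [rep_match bK1 bR1 _ (by decide) (List.prefix_append bK1 u), List.drop_left]
  rw [rep_append_incompat bK2 bR2 bR1 _ (by decide)]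
  rw [rep_append_incompat bK3 bR3 bR1 _ (by decide)]
  rw [rep_append_incompat bK4 bR4 bR1 _ (by decide)]
  have hk5 : ∀ i, i < bR1.length →
      ¬ bK5 <+: (bR1.drop i ++ rep bK4 bR4 (rep bK3 bR3 (rep bK2 bR2 (rep bK1 bR1 u)))) := by
    intro i hi
    have hi7 : i < 7 := by simpa [bR1] using hi
    interval_cases i
    · exact not_prefix_append_of_incompat _ _ _ (by decide) (by decide)
    · exact not_prefix_append_of_incompat _ _ _ (by decide) (by decide)
    · exact not_prefix_append_of_incompat _ _ _ (by decide) (by decide)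
    · exact not_prefix_append_of_incompat _ _ _ (by decide) (by decide)
    · exact not_prefix_append_of_incompat _ _ _ (by decide) (by decide)
    · exact not_prefix_append_of_incompat _ _ _ (by decide) (by decide)
    · intro hx
      have hx' : bK5 <+: 's' :: rep bK4 bR4 (rep bK3 bR3 (rep bK2 bR2 (rep bK1 bR1 u))) := hx
      rw [show bK5 = 's' :: ['t', 'u', 'd', 'y', ' ', 's', 'h', 'o', 'w', 's'] from rfl,
          List.cons_prefix_cons] at hx'
      exact noTudy u hb1 hb6 hx'.2
  rw [rep_append bK5 bR5 bR1 _ hk5]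

lemma comp_match2 (u : List Char) : compR (bK2 ++ u) = bR2 ++ compR u := by
  unfold compR
  rw [rep_append_incompat bK1 bR1 bK2 u (by decide)]
  rw [rep_match bK2 bR2 _ (by decide) (List.prefix_append bK2 _), List.drop_left]
  rw [rep_append_incompat bK3 bR3 bR2 _ (by decide)]
  rw [rep_append_incompat bK4 bR4 bR2 _ (by decide)]
  rw [rep_append_incompat bK5 bR5 bR2 _ (by decide)]

lemma comp_match3 (u : List Char) : compR (bK3 ++ u) = bR3 ++ compR u := by
  unfold compR
  rw [rep_append_incompat bK1 bR1 bK3 u (by decide)]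
  rw [rep_append_incompat bK2 bR2 bK3 _ (by decide)]
  rw [rep_match bK3 bR3 _ (by decide) (List.prefix_append bK3 _), List.drop_left]
  rw [rep_append_incompat bK4 bR4 bR3 _ (by decide)]
  rw [rep_append_incompat bK5 bR5 bR3 _ (by decide)]

lemma comp_match4 (u : List Char)
    (hb2 : ¬ ['f', 'f', 'i', 'c', 'i', 'a', 'l', 's'] <+: u)
    (hb3 : ¬ ['u', 'd', 'y', ' ', 's', 'h', 'o', 'w', 's'] <+: u)
    (hb5 : ¬ (['u', 'd', 'y', ' ', 's', 'h', 'o', 'w'] ++ bK1) <+: u) :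
    compR (bK4 ++ u) = bR4 ++ compR u := by
  have hk1 : ∀ i, i < bK4.length → ¬ bK1 <+: (bK4.drop i ++ u) := by
    intro i hi
    have hi12 : i < 12 := by simpa [bK4] using hi
    interval_cases i
    · exact not_prefix_append_of_incompat _ _ _ (by decide) (by decide)
    · exact not_prefix_append_of_incompat _ _ _ (by decide) (by decide)
    · exact not_prefix_append_of_incompat _ _ _ (by decide) (by decide)
    · exact not_prefix_append_of_incompat _ _ _ (by decide) (by decide)
    · exact not_prefix_append_of_incompat _ _ _ (by decide) (by decide)
    · exact not_prefix_append_of_incompat _ _ _ (by decide) (by decide)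
    · exact not_prefix_append_of_incompat _ _ _ (by decide) (by decide)
    · exact not_prefix_append_of_incompat _ _ _ (by decide) (by decide)
    · exact not_prefix_append_of_incompat _ _ _ (by decide) (by decide)
    · exact not_prefix_append_of_incompat _ _ _ (by decide) (by decide)
    · exact not_prefix_append_of_incompat _ _ _ (by decide) (by decide)
    · intro hx
      have hx' : bK1 <+: 'o' :: u := hx
      rw [show bK1 = 'o' :: ['f', 'f', 'i', 'c', 'i', 'a', 'l', 's'] from rfl,
          List.cons_prefix_cons] at hx'
      exact hb2 hx'.2
  have hk5 : ∀ i, i < bR4.length →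
      ¬ bK5 <+: (bR4.drop i ++ rep bK4 bR4 (rep bK3 bR3 (rep bK2 bR2 (rep bK1 bR1 u)))) := by
    intro i hi
    have hi14 : i < 14 := by simpa [bR4] using hi
    interval_cases i
    · exact not_prefix_append_of_incompat _ _ _ (by decide) (by decide)
    · exact not_prefix_append_of_incompat _ _ _ (by decide) (by decide)
    · exact not_prefix_append_of_incompat _ _ _ (by decide) (by decide)
    · exact not_prefix_append_of_incompat _ _ _ (by decide) (by decide)
    · exact not_prefix_append_of_incompat _ _ _ (by decide) (by decide)
    · exact not_prefix_append_of_incompat _ _ _ (by decide) (by decide)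
    · exact not_prefix_append_of_incompat _ _ _ (by decide) (by decide)
    · exact not_prefix_append_of_incompat _ _ _ (by decide) (by decide)
    · exact not_prefix_append_of_incompat _ _ _ (by decide) (by decide)
    · exact not_prefix_append_of_incompat _ _ _ (by decide) (by decide)
    · exact not_prefix_append_of_incompat _ _ _ (by decide) (by decide)
    · exact not_prefix_append_of_incompat _ _ _ (by decide) (by decide)
    · intro hx
      have hx' : bK5 <+: 's' :: 't' :: rep bK4 bR4 (rep bK3 bR3 (rep bK2 bR2 (rep bK1 bR1 u))) := hx
      rw [show bK5 = 's' :: 't' :: ['u', 'd', 'y', ' ', 's', 'h', 'o', 'w', 's'] from rfl,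
          List.cons_prefix_cons] at hx'
      rw [List.cons_prefix_cons] at hx'
      exact noUdy u hb3 hb5 hx'.2.2
    · exact not_prefix_append_of_incompat _ _ _ (by decide) (by decide)
  unfold compR
  rw [rep_append bK1 bR1 bK4 u hk1]
  rw [rep_append_incompat bK2 bR2 bK4 _ (by decide)]
  rw [rep_append_incompat bK3 bR3 bK4 _ (by decide)]
  rw [rep_match bK4 bR4 _ (by decide) (List.prefix_append bK4 _), List.drop_left]
  rw [rep_append bK5 bR5 bR4 _ hk5]

lemma comp_match5 (u : List Char) : compR (bK5 ++ u) = bR5 ++ compR u := by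
  unfold compR
  rw [rep_append_incompat bK1 bR1 bK5 u (by decide)]
  rw [rep_append_incompat bK2 bR2 bK5 _ (by decide)]
  rw [rep_append_incompat bK3 bR3 bK5 _ (by decide)]
  rw [rep_append_incompat bK4 bR4 bK5 _ (by decide)]
  rw [rep_match bK5 bR5 _ (by decide) (List.prefix_append bK5 _), List.drop_left]

lemma comp_step (c : Char) (t : List Char) (hp : PreL (c :: t))
    (h1 : ¬ bK1 <+: (c :: t)) (h2 : ¬ bK2 <+: (c :: t)) (h3 : ¬ bK3 <+: (c :: t))
    (h4 : ¬ bK4 <+: (c :: t)) (h5 : ¬ bK5 <+: (c :: t)) :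
    compR (c :: t) = c :: compR t := by
  have q2 : ¬ bK2 <+: c :: rep bK1 bR1 t := by
    intro hx
    rw [show bK2 = 'c' :: ['o', 'n', 'f', 'i', 'r', 'm', 'e', 'd'] from rfl,
        List.cons_prefix_cons] at hx
    have := rep_transfer bK1 bR1 _ (by decide) _ hx.2
    exact h2 (List.cons_prefix_cons.mpr ⟨hx.1, this⟩)
  have q3 : ¬ bK3 <+: c :: rep bK2 bR2 (rep bK1 bR1 t) := by
    intro hx
    rw [show bK3 = 'r' :: ['e', 'p', 'o', 'r', 't', 'e', 'd'] from rfl,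
        List.cons_prefix_cons] at hx
    have := rep_transfer bK1 bR1 _ (by decide) _
      (rep_transfer bK2 bR2 _ (by decide) _ hx.2)
    exact h3 (List.cons_prefix_cons.mpr ⟨hx.1, this⟩)
  have q4 : ¬ bK4 <+: c :: rep bK3 bR3 (rep bK2 bR2 (rep bK1 bR1 t)) := by
    intro hx
    rw [show bK4 = 'a' :: ['c', 'c', 'o', 'r', 'd', 'i', 'n', 'g', ' ', 't', 'o'] from rfl,
        List.cons_prefix_cons] at hx
    have := rep_transfer bK1 bR1 _ (by decide) _
      (rep_transfer bK2 bR2 _ (by decide) _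
        (rep_transfer bK3 bR3 _ (by decide) _ hx.2))
    exact h4 (List.cons_prefix_cons.mpr ⟨hx.1, this⟩)
  have q5 : ¬ bK5 <+: c :: rep bK4 bR4 (rep bK3 bR3 (rep bK2 bR2 (rep bK1 bR1 t))) := by
    intro hx
    rw [show bK5 = 's' :: ['t', 'u', 'd', 'y', ' ', 's', 'h', 'o', 'w', 's'] from rfl,
        List.cons_prefix_cons] at hx
    obtain ⟨hc, hX⟩ := hx
    subst hc
    refine noTudy t ?_ ?_ hX
    · intro hX10t
      exact h5 (List.cons_prefix_cons.mpr ⟨rfl, hX10t⟩)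
    · intro hPt
      obtain ⟨v, hv⟩ := hPt
      exact hp.2.2.2.2 ⟨[], v, by rw [← hv]; rfl⟩
  unfold compR
  rw [rep_step bK1 bR1 c t h1, rep_step bK2 bR2 c _ q2, rep_step bK3 bR3 c _ q3,
      rep_step bK4 bR4 c _ q4, rep_step bK5 bR5 c _ q5]

lemma mainL : ∀ (n : Nat) (t : List Char), t.length ≤ n → PreL t → compR t = scanChars t := by
  intro n
  induction n with
  | zero =>
    intro t hlen _
    have ht : t = [] := by cases t with | nil => rfl | cons a b => simp at hlen
    subst ht
    rw [scan_nil]; simp [compR, rep_nil]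
  | succ n ih =>
    intro t hlen hp
    rcases t with _ | ⟨c, t'⟩
    · rw [scan_nil]; simp [compR, rep_nil]
    by_cases h1 : bK1 <+: (c :: t')
    · obtain ⟨u, hu⟩ := h1
      have h1' : bK1 <+: (c :: t') := ⟨u, hu⟩
      have hlu : u.length ≤ n := by
        have hL := congrArg List.length hu
        simp [bK1] at hL; simp at hlen; omega
      have hpu : PreL u := PreL_suffix (hu ▸ List.suffix_append bK1 u) hp
      have hb1 : ¬ ['t', 'u', 'd', 'y', ' ', 's', 'h', 'o', 'w', 's'] <+: u := by
        intro hc'; obtain ⟨v, hv⟩ := hc'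
        exact hp.1 ⟨[], v, by rw [← hu, ← hv]; rfl⟩
      have hb6 : ¬ (['t', 'u', 'd', 'y', ' ', 's', 'h', 'o', 'w'] ++ bK1) <+: u := by
        intro hc'; obtain ⟨v, hv⟩ := hc'
        exact hp.2.2.2.2 ⟨['o', 'f', 'f', 'i', 'c', 'i', 'a', 'l'], v, by rw [← hu, ← hv]; rfl⟩
      rw [scan1 c t' h1', ← hu, List.drop_left, comp_match1 u hb1 hb6, ih u hlu hpu]
    by_cases h2 : bK2 <+: (c :: t')
    · obtain ⟨u, hu⟩ := h2
      have h2' : bK2 <+: (c :: t') := ⟨u, hu⟩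
      have hlu : u.length ≤ n := by
        have hL := congrArg List.length hu
        simp [bK2] at hL; simp at hlen; omega
      have hpu : PreL u := PreL_suffix (hu ▸ List.suffix_append bK2 u) hp
      rw [scan2 c t' h1 h2', ← hu, List.drop_left, comp_match2 u, ih u hlu hpu]
    by_cases h3 : bK3 <+: (c :: t')
    · obtain ⟨u, hu⟩ := h3
      have h3' : bK3 <+: (c :: t') := ⟨u, hu⟩
      have hlu : u.length ≤ n := by
        have hL := congrArg List.length hu
        simp [bK3] at hL; simp at hlen; omega
      have hpu : PreL u := PreL_suffix (hu ▸ List.suffix_append bK3 u) hp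
      rw [scan3 c t' h1 h2 h3', ← hu, List.drop_left, comp_match3 u, ih u hlu hpu]
    by_cases h4 : bK4 <+: (c :: t')
    · obtain ⟨u, hu⟩ := h4
      have h4' : bK4 <+: (c :: t') := ⟨u, hu⟩
      have hlu : u.length ≤ n := by
        have hL := congrArg List.length hu
        simp [bK4] at hL; simp at hlen; omega
      have hpu : PreL u := PreL_suffix (hu ▸ List.suffix_append bK4 u) hp
      have hb2 : ¬ ['f', 'f', 'i', 'c', 'i', 'a', 'l', 's'] <+: u := by
        intro hc'; obtain ⟨v, hv⟩ := hc'
        exact hp.2.1 ⟨[], v, by rw [← hu, ← hv]; rfl⟩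
      have hb3 : ¬ ['u', 'd', 'y', ' ', 's', 'h', 'o', 'w', 's'] <+: u := by
        intro hc'; obtain ⟨v, hv⟩ := hc'
        exact hp.2.2.1 ⟨[], v, by rw [← hu, ← hv]; rfl⟩
      have hb5 : ¬ (['u', 'd', 'y', ' ', 's', 'h', 'o', 'w'] ++ bK1) <+: u := by
        intro hc'; obtain ⟨v, hv⟩ := hc'
        exact hp.2.2.2.1 ⟨[], v, by rw [← hu, ← hv]; rfl⟩
      rw [scan4 c t' h1 h2 h3 h4', ← hu, List.drop_left, comp_match4 u hb2 hb3 hb5, ih u hlu hpu]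
    by_cases h5 : bK5 <+: (c :: t')
    · obtain ⟨u, hu⟩ := h5
      have h5' : bK5 <+: (c :: t') := ⟨u, hu⟩
      have hlu : u.length ≤ n := by
        have hL := congrArg List.length hu
        simp [bK5] at hL; simp at hlen; omega
      have hpu : PreL u := PreL_suffix (hu ▸ List.suffix_append bK5 u) hp
      rw [scan5 c t' h1 h2 h3 h4 h5', ← hu, List.drop_left, comp_match5 u, ih u hlu hpu]
    · have hlt : t'.length ≤ n := by simp at hlen; omega
      rw [scan_step c t' h1 h2 h3 h4 h5, comp_step c t' hp h1 h2 h3 h4 h5,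
          ih t' hlt (PreL_suffix (List.suffix_cons c t') hp)]


-- ===== VERDICT (by name: the statement is the Claim_ definition above) =====
theorem modify_attribution_words_py_spec : Claim_equal_modify_attribution_words_py := by
  unfold Claim_equal_modify_attribution_words_py
  intro text hdom hpre
  unfold Spec_modify_attribution_words_py
  obtain ⟨p1, p2, p3, p5, p6⟩ := hpre
  have mkneg : ∀ (sub : String) (bl : List Char), sub.toList = bl →
      PySem.Str.isIn sub text = false → ¬ bl <:+: text.toList := by
    intro sub bl hbl hfalse hc
    rw [← hbl] at hc
    rw [(PySem.Str.isIn_iff_infix sub text).mpr hc] at hfalse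
    exact absurd hfalse (by simp)
  have hpl : PreL text.toList :=
    ⟨mkneg _ bb1 (by decide) p1, mkneg _ bb2 (by decide) p2, mkneg _ bb3 (by decide) p3,
     mkneg _ bb5 (by decide) p5, mkneg _ bb6 (by decide) p6⟩
  have hmain := mainL text.toList.length text.toList le_rfl hpl
  have r1 : ∀ s : List Char, PySem.Chars.replace s "officials".toList "sources".toList = rep bK1 bR1 s := by
    intro s
    rw [show ("officials".toList : List Char) = bK1 from by decide,
        show ("sources".toList : List Char) = bR1 from by decide]
    exact replace_eq_rep s bK1 bR1 (by decide)
  have r2 : ∀ s : List Char, PySem.Chars.replace s "confirmed".toList "alleged".toList = rep bK2 bR2 s := by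
    intro s
    rw [show ("confirmed".toList : List Char) = bK2 from by decide,
        show ("alleged".toList : List Char) = bR2 from by decide]
    exact replace_eq_rep s bK2 bR2 (by decide)
  have r3 : ∀ s : List Char, PySem.Chars.replace s "reported".toList "claimed".toList = rep bK3 bR3 s := by
    intro s
    rw [show ("reported".toList : List Char) = bK3 from by decide,
        show ("claimed".toList : List Char) = bR3 from by decide]
    exact replace_eq_rep s bK3 bR3 (by decide)
  have r4 : ∀ s : List Char, PySem.Chars.replace s "according to".toList "rumors suggest".toList = rep bK4 bR4 s := by
    intro s
    rw [show ("according to".toList : List Char) = bK4 from by decide,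
        show ("rumors suggest".toList : List Char) = bR4 from by decide]
    exact replace_eq_rep s bK4 bR4 (by decide)
  have r5 : ∀ s : List Char, PySem.Chars.replace s "study shows".toList "some say".toList = rep bK5 bR5 s := by
    intro s
    rw [show ("study shows".toList : List Char) = bK5 from by decide,
        show ("some say".toList : List Char) = bR5 from by decide]
    exact replace_eq_rep s bK5 bR5 (by decide)
  have hA : (modify_attribution_words_py text).toList = compR text.toList := by
    unfold modify_attribution_words_py
    simp only [List.foldl_cons, List.foldl_nil]
    simp only [PySem.Str.toList_replace]
    rw [r1, r2, r3, r4, r5]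
    rfl
  have hB : (modify_attribution_words_py_alt text).toList = scanChars text.toList := by
    unfold modify_attribution_words_py_alt
    exact String.toList_ofList
  have : (modify_attribution_words_py text).toList = (modify_attribution_words_py_alt text).toList := by
    rw [hA, hB, hmain]
  calc modify_attribution_words_py text
      = String.ofList (modify_attribution_words_py text).toList := String.ofList_toList.symm
    _ = String.ofList (modify_attribution_words_py_alt text).toList := by rw [this]
    _ = modify_attribution_words_py_alt text := String.ofList_toList
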